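-- pv_equiv track=rewrite | github.com/joshuaowalker/gaphack | gaphack/utils.py | replace_terminal_gaps
-- ===== SOURCE A (Python) =====
-- from typing import List, Tuple, Optional, Literal, Dict
--
-- def replace_terminal_gaps(aligned_sequences: List[str]) -> List[str]:
--     """Replace leading and trailing '-' gaps with '.' to mark terminal gaps.
--
--     Args:
--         aligned_sequences: List of aligned sequences with gap characters
--
--     Returns:
--         List of sequences with terminal gaps marked as '.'
--     """
--     processed = []
--
--     for seq in aligned_sequences:
--         seq_list = list(seq)
--
--         # Find first non-gap character
--         first_base = None
--         for i, char in enumerate(seq_list):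
--             if char != '-':
--                 first_base = i
--                 break
--
--         # Find last non-gap character
--         last_base = None
--         for i in range(len(seq_list) - 1, -1, -1):
--             if seq_list[i] != '-':
--                 last_base = i
--                 break
--
--         # Replace leading gaps with '.'
--         if first_base is not None:
--             for i in range(first_base):
--                 if seq_list[i] == '-':
--                     seq_list[i] = '.'
--
--         # Replace trailing gaps with '.'
--         if last_base is not None:
--             for i in range(last_base + 1, len(seq_list)):
--                 if seq_list[i] == '-':
--                     seq_list[i] = '.'
--
--         processed.append(''.join(seq_list))
--
--     return processed
-- ===== SOURCE B (Python) =====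
-- def _mark(seq):
--     core = seq.lstrip('-')
--     if not core:
--         # all-gap (or empty) sequence: nothing to mark
--         return seq
--     lead = len(seq) - len(core)
--     trail = len(core) - len(core.rstrip('-'))
--     return '.' * lead + seq[lead:len(seq) - trail] + '.' * trail
--
--
-- def replace_terminal_gaps(aligned_sequences):
--     return [_mark(seq) for seq in aligned_sequences]
-- ===== Notes on version B (the rewrite author's own statement) =====
-- stated objective: simpler
-- what changed: Replaces the four index-scanning Python loops and in-place list mutation per sequence with strip-based length counting and slice concatenation ('.'*lead + seq[lead:len-trail] + '.'*trail), keeping all-gap sequences unchanged.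
import Mathlib
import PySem

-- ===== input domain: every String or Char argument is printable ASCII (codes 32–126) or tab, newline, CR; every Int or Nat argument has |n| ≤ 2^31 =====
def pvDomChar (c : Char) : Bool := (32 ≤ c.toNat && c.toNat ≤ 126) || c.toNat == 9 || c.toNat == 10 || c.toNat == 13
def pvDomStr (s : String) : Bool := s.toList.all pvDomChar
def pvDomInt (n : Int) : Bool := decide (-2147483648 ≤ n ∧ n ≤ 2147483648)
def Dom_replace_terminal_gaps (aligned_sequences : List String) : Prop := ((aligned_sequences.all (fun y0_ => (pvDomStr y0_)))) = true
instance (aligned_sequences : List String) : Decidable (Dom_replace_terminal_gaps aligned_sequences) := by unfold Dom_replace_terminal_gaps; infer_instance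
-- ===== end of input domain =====

-- B replaces A's four index-scanning loops and in-place mutation per sequence by strip-based
-- length counting and slice concatenation (objective: simpler); return values agree on all inputs.

-- ===== PORT A =====
-- per-sequence body of A's loop: scan for first/last non-gap index, then overwrite
-- the leading and trailing ranges index by index
def pvMarkA (s : String) : String :=
  let seq_list := s.toList
  -- first non-gap character (enumerate loop with break)
  let first_base : Option Nat := seq_list.findIdx? (fun c => c != '-')
  -- last non-gap character (backward scan over range(len-1, -1, -1) with break)
  let last_base : Option Nat :=
    (seq_list.reverse.findIdx? (fun c => c != '-')).map (fun j => seq_list.length - 1 - j)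
  -- replace leading gaps with '.' (for i in range(first_base): if seq_list[i] == '-': …)
  let l1 := match first_base with
    | none => seq_list
    | some f => seq_list.mapIdx (fun i c => if i < f ∧ c = '-' then '.' else c)
  -- replace trailing gaps with '.' (for i in range(last_base+1, len): if seq_list[i] == '-': …)
  let l2 := match last_base with
    | none => l1
    | some lb => l1.mapIdx (fun i c => if lb + 1 ≤ i ∧ c = '-' then '.' else c)
  String.ofList l2

def replace_terminal_gaps (aligned_sequences : List String) : List String :=
  aligned_sequences.foldl (fun acc seq => acc ++ [pvMarkA seq]) []

-- ===== PORT B =====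
-- per-sequence helper _mark of Source B: lstrip/rstrip length counting + slice concatenation
def pvMarkB (s : String) : String :=
  let cs := s.toList
  let core := cs.dropWhile (fun c => c == '-')   -- seq.lstrip('-')
  if core.isEmpty then s                          -- all-gap (or empty): unchanged
  else
    let lead := cs.length - core.length
    let trail := core.length - (core.reverse.dropWhile (fun c => c == '-')).length  -- len(core) - len(core.rstrip('-'))
    String.ofList (List.replicate lead '.' ++ ((cs.drop lead).take (cs.length - trail - lead)) ++ List.replicate trail '.')

def replace_terminal_gaps_alt (aligned_sequences : List String) : List String :=
  aligned_sequences.map pvMarkB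

-- ===== PRECONDITION & SPEC =====
def Spec_replace_terminal_gaps (aligned_sequences : List String) (out : List String) : Prop := out = replace_terminal_gaps_alt aligned_sequences
instance (aligned_sequences : List String) (out : List String) : Decidable (Spec_replace_terminal_gaps aligned_sequences out) := by unfold Spec_replace_terminal_gaps; infer_instance

-- ===== CLAIM (what is proved, stated in full; the proofs are below) =====
def Claim_equal_replace_terminal_gaps : Prop := ∀ (aligned_sequences : List String), Dom_replace_terminal_gaps aligned_sequences → Spec_replace_terminal_gaps aligned_sequences (replace_terminal_gaps aligned_sequences)

-- ===== LEMMAS AND PROOFS =====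

-- head of a non-empty dropWhile fails the predicate
lemma pv_dropWhile_head {α : Type} (p : α → Bool) (l : List α) (a : α) (t : List α)
    (h : l.dropWhile p = a :: t) : p a = false := by
  induction l with
  | nil => simp at h
  | cons x xs ih =>
      by_cases hx : p x
      · rw [List.dropWhile_cons_of_pos hx] at h; exact ih h
      · rw [List.dropWhile_cons_of_neg hx] at h
        cases h; simpa using hx

lemma pv_dropWhile_replicate {α : Type} (p : α → Bool) (n : Nat) (a : α) (h : p a = true) :
    (List.replicate n a).dropWhile p = [] := by
  simp [h]

lemma pv_findIdx?_replicate_gap (n : Nat) :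
    (List.replicate n '-').findIdx? (fun c => c != '-') = none := by
  simp

lemma pv_mapIdx_replicate {α : Type} (g : Nat → α → α) (n : Nat) (a b : α)
    (h : ∀ i, i < n → g i a = b) :
    List.mapIdx g (List.replicate n a) = List.replicate n b := by
  apply List.ext_getElem
  · simp
  · intro i hi hj
    simp only [List.getElem_mapIdx, List.getElem_replicate]
    exact h i (by simpa using hj)

lemma pv_mapIdx_eq_self {α : Type} (g : Nat → α → α) (l : List α)
    (h : ∀ i (hi : i < l.length), g i l[i] = l[i]) : List.mapIdx g l = l := by
  apply List.ext_getElem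
  · simp
  · intro i hi hj
    simp only [List.getElem_mapIdx]
    exact h i (by simpa using hj)

-- the decomposition: a sequence with a non-gap character is
-- (leading gaps) ++ (core starting and ending in non-gaps) ++ (trailing gaps)
lemma pv_decomp (cs : List Char) (m0 : Char) (t0 : List Char)
    (h : cs.dropWhile (fun c => c == '-') = m0 :: t0) :
    ∃ f t M, cs = List.replicate f '-' ++ M ++ List.replicate t '-' ∧
      M ≠ [] ∧ M.head? ≠ some '-' ∧ M.getLast? ≠ some '-' := by
  set p : Char → Bool := fun c => c == '-' with hp
  set core : List Char := cs.dropWhile p with hcore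
  have hm0 : p m0 = false := pv_dropWhile_head p cs m0 t0 h
  obtain ⟨ff, hlead⟩ : ∃ n, cs.takeWhile p = List.replicate n '-' := by
    refine ⟨(cs.takeWhile p).length, List.eq_replicate_of_mem ?_⟩
    intro b hb
    simpa [hp] using List.mem_takeWhile_imp hb
  obtain ⟨tt, htr⟩ : ∃ n, core.reverse.takeWhile p = List.replicate n '-' := by
    refine ⟨(core.reverse.takeWhile p).length, List.eq_replicate_of_mem ?_⟩
    intro b hb
    simpa [hp] using List.mem_takeWhile_imp hb
  set R : List Char := core.reverse.dropWhile p with hR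
  have hRne : R ≠ [] := by
    intro hnil
    have hmem : m0 ∈ core.reverse := by simp [h]
    rw [← List.takeWhile_append_dropWhile (p := p) (l := core.reverse), ← hR, hnil,
      List.append_nil, htr] at hmem
    have := List.eq_of_mem_replicate hmem
    simp [hp, this] at hm0
  have hcoreR : core = R.reverse ++ List.replicate tt '-' := by
    have h2 : core.reverse = core.reverse.takeWhile p ++ R := (List.takeWhile_append_dropWhile).symm
    calc core = core.reverse.reverse := by simp
    _ = (core.reverse.takeWhile p ++ R).reverse := by rw [← h2]
    _ = R.reverse ++ (core.reverse.takeWhile p).reverse := by simp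
    _ = _ := by rw [htr]; simp
  refine ⟨ff, tt, R.reverse, ?_, by simpa using hRne, ?_, ?_⟩
  · calc cs = cs.takeWhile p ++ core := (List.takeWhile_append_dropWhile).symm
    _ = _ := by rw [hlead, hcoreR, List.append_assoc]
  · have h1 : (R.reverse ++ List.replicate tt '-').head? = core.head? := by rw [← hcoreR]
    rw [List.head?_append_of_ne_nil _ (by simpa using hRne)] at h1
    rw [h1, h]
    simp [hp] at hm0
    simp [hm0]
  · obtain ⟨r, R', hRc⟩ := List.exists_cons_of_ne_nil hRne
    have hr : p r = false := pv_dropWhile_head p core.reverse r R' (by rw [← hR, hRc])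
    rw [hRc]
    simp [List.getLast?_reverse]
    simpa [hp] using hr

lemma pv_markA_decomp (f t : Nat) (M : List Char) (hM : M ≠ [])
    (hh : M.head? ≠ some '-') (hl : M.getLast? ≠ some '-') :
    pvMarkA (String.ofList (List.replicate f '-' ++ M ++ List.replicate t '-')) =
      String.ofList (List.replicate f '.' ++ M ++ List.replicate t '.') := by
  obtain ⟨m, Mt, rfl⟩ := List.exists_cons_of_ne_nil hM
  have hm : ¬ m = '-' := by simpa using hh
  obtain ⟨r, Rt, hrev⟩ := List.exists_cons_of_ne_nil (by simp : (m :: Mt).reverse ≠ [])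
  have hr : ¬ r = '-' := by
    have h0 : (m :: Mt).reverse.head? = (m :: Mt).getLast? := List.head?_reverse
    rw [hrev] at h0
    simp at h0
    rw [← h0] at hl
    simpa using hl
  unfold pvMarkA
  simp only [String.toList_ofList]
  set cs : List Char := List.replicate f '-' ++ (m :: Mt) ++ List.replicate t '-' with hcs
  have hlen : cs.length = f + (Mt.length + 1) + t := by simp [hcs]; omega
  have hfb : cs.findIdx? (fun c => c != '-') = some f := by
    rw [hcs, List.append_assoc, List.findIdx?_append, pv_findIdx?_replicate_gap]
    simp [List.findIdx?_cons, hm]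
  have hrevcs : cs.reverse = List.replicate t '-' ++ ((r :: Rt) ++ List.replicate f '-') := by
    have h0 : cs.reverse = List.replicate t '-' ++ ((m :: Mt).reverse ++ List.replicate f '-') := by
      rw [hcs]; simp
    rw [h0, hrev]
  have hlb : cs.reverse.findIdx? (fun c => c != '-') = some t := by
    rw [hrevcs, List.findIdx?_append, pv_findIdx?_replicate_gap]
    simp [List.findIdx?_cons, hr]
  rw [hfb, hlb]
  simp only [Option.map_some]
  have hone : cs.length - 1 - t = f + Mt.length := by omega
  rw [hone]
  -- first mapIdx: leading gaps become dots
  have h1 : cs.mapIdx (fun i c => if i < f ∧ c = '-' then '.' else c)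
      = List.replicate f '.' ++ (m :: Mt) ++ List.replicate t '-' := by
    rw [hcs, List.append_assoc, List.mapIdx_append, List.append_assoc]
    congr 1
    · exact pv_mapIdx_replicate _ f '-' '.' (fun i hi => by simp [hi])
    · refine pv_mapIdx_eq_self _ _ (fun i hi => ?_)
      simp only [List.length_replicate]
      have : ¬ (i + f < f) := by omega
      simp [this]
  rw [h1]
  -- second mapIdx: trailing gaps become dots
  have h2len : (List.replicate f '.' ++ (m :: Mt)).length = f + Mt.length + 1 := by
    simp only [List.length_append, List.length_replicate, List.length_cons]; omega
  rw [List.mapIdx_append]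
  congr 1
  congr 1
  · refine pv_mapIdx_eq_self _ _ (fun i hi => ?_)
    rw [h2len] at hi
    have : ¬ (f + Mt.length + 1 ≤ i) := by omega
    simp [this]
  · rw [h2len]
    exact pv_mapIdx_replicate _ t '-' '.' (fun i hi => by simp)

lemma pv_markB_decomp (f t : Nat) (M : List Char) (hM : M ≠ [])
    (hh : M.head? ≠ some '-') (hl : M.getLast? ≠ some '-') :
    pvMarkB (String.ofList (List.replicate f '-' ++ M ++ List.replicate t '-')) =
      String.ofList (List.replicate f '.' ++ M ++ List.replicate t '.') := by
  obtain ⟨m, Mt, rfl⟩ := List.exists_cons_of_ne_nil hM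
  have hm : ¬ m = '-' := by simpa using hh
  obtain ⟨r, Rt, hrev⟩ := List.exists_cons_of_ne_nil (by simp : (m :: Mt).reverse ≠ [])
  have hr : ¬ r = '-' := by
    have h0 : (m :: Mt).reverse.head? = (m :: Mt).getLast? := List.head?_reverse
    rw [hrev] at h0
    simp at h0
    rw [← h0] at hl
    simpa using hl
  unfold pvMarkB
  simp only [String.toList_ofList]
  set cs : List Char := List.replicate f '-' ++ (m :: Mt) ++ List.replicate t '-' with hcs
  have hcore : cs.dropWhile (fun c => c == '-') = (m :: Mt) ++ List.replicate t '-' := by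
    rw [hcs, List.append_assoc, List.dropWhile_append, pv_dropWhile_replicate _ _ _ (by simp)]
    simp [hm]
  rw [hcore]
  simp only [List.isEmpty_cons, List.cons_append, Bool.false_eq_true, if_false]
  have hlen : cs.length = f + ((Mt.length + 1) + t) := by simp [hcs]; omega
  have hclen : ((m :: Mt) ++ List.replicate t '-').length = (Mt.length + 1) + t := by
    simp only [List.length_append, List.length_replicate, List.length_cons]
  have hlead : cs.length - ((m :: Mt) ++ List.replicate t '-').length = f := by
    rw [hlen, hclen]; omega
  have hrstrip : ((m :: Mt) ++ List.replicate t '-').reverse.dropWhile (fun c => c == '-')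
      = (m :: Mt).reverse := by
    have h0 : ((m :: Mt) ++ List.replicate t '-').reverse
        = List.replicate t '-' ++ (r :: Rt) := by
      rw [List.reverse_append, List.reverse_replicate, hrev]
    rw [h0, List.dropWhile_append, pv_dropWhile_replicate _ _ _ (by simp)]
    simp [hr, hrev]
  have htrail : ((m :: Mt) ++ List.replicate t '-').length
      - (((m :: Mt) ++ List.replicate t '-').reverse.dropWhile (fun c => c == '-')).length = t := by
    rw [hrstrip, hclen]; simp
  have hdrop : cs.drop f = (m :: Mt) ++ List.replicate t '-' := by
    have h0 : cs.drop (List.replicate f '-' (α := Char)).length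
        = (m :: Mt) ++ List.replicate t '-' := by
      rw [hcs, List.append_assoc]; exact List.drop_left
    simpa using h0
  have htake : ((m :: Mt) ++ List.replicate t '-').take (cs.length - t - f) = m :: Mt := by
    have h0 : cs.length - t - f = (m :: Mt).length := by rw [hlen]; simp; omega
    rw [h0]; exact List.take_left
  simp only [List.cons_append] at hlead htrail hdrop htake ⊢
  rw [hlead, htrail, hdrop, htake]

theorem pv_mark_eq (s : String) : pvMarkA s = pvMarkB s := by
  cases h : s.toList.dropWhile (fun c => c == '-') with
  | nil =>
      -- all-gap (or empty) sequence: both sides return s unchanged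
      have hall : ∀ c ∈ s.toList, c = '-' := by
        intro c hc
        have := List.dropWhile_eq_nil_iff.mp h c hc
        simpa using this
      have hA : pvMarkA s = s := by
        unfold pvMarkA
        have h1 : s.toList.findIdx? (fun c => c != '-') = none := by
          simp only [List.findIdx?_eq_none_iff]
          intro x hx; simp [hall x hx]
        have h2 : s.toList.reverse.findIdx? (fun c => c != '-') = none := by
          simp only [List.findIdx?_eq_none_iff]
          intro x hx; simp [hall x (List.mem_reverse.mp hx)]
        simp [h1, h2, String.ofList_toList]
      have hB : pvMarkB s = s := by
        unfold pvMarkB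
        simp [h]
      rw [hA, hB]
  | cons m0 t0 =>
      obtain ⟨f, t, M, hcs, hM, hh, hl⟩ := pv_decomp s.toList m0 t0 h
      have hs : s = String.ofList (List.replicate f '-' ++ M ++ List.replicate t '-') := by
        rw [← hcs, String.ofList_toList]
      rw [hs, pv_markA_decomp f t M hM hh hl, pv_markB_decomp f t M hM hh hl]

-- ===== VERDICT (by name: the statement is the Claim_ definition above) =====
theorem replace_terminal_gaps_spec : Claim_equal_replace_terminal_gaps := by
  intro xs _
  unfold Spec_replace_terminal_gaps replace_terminal_gaps replace_terminal_gaps_alt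
  rw [PySem.List.foldl_append_singleton_eq_map]
  exact List.map_congr_left (fun s _ => pv_mark_eq s)
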